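-- pv_equiv track=rewrite | github.com/Matteo-Candi/Master-Thesis | results/test_01/test_01_formatted.py | search
-- ===== SOURCE A (Python) =====
-- def search(lst):
--     counter = {}
--     for i in lst:
--         counter[i] = counter.get(i, 0) + 1
--     ans = -1
--     for item in counter.items():
--         if item[1] >= item[0] and item[0] > ans:
--             ans = item[0]
--     return ans
-- ===== SOURCE B (Python) =====
-- def search(lst):
--     s = sorted(lst)
--     ans = -1
--     n = len(s)
--     i = 0
--     while i < n:
--         v = s[i]
--         j = i + 1
--         while j < n and s[j] == v:
--             j += 1
--         if j - i >= v and v > ans: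
--             ans = v
--         i = j
--     return ans
-- ===== Notes on version B (the rewrite author's own statement) =====
-- stated objective: alternative
-- what changed: Counts are obtained from consecutive runs of a sorted copy in a single scan (no dictionary), updating the running maximum at each run boundary.
import Mathlib
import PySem

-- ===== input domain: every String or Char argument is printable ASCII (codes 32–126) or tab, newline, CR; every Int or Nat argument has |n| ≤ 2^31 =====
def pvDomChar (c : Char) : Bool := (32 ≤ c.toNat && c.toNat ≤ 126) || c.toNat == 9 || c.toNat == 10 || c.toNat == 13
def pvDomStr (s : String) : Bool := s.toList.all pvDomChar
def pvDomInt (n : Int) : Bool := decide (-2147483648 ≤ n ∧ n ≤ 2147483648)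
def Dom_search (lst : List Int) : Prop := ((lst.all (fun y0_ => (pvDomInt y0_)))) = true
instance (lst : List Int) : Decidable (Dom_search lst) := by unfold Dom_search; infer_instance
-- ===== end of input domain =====

-- B replaces A's hash-dictionary counting by a single scan over a sorted copy,
-- reading each value's count off the length of its consecutive run (alternative
-- decomposition; no speed claim).


-- ===== PORT A =====
def search (lst : List Int) : Int :=
  let counter := lst.foldl (fun d i => d.insert i (d.getD i 0 + 1)) PySem.Dict.empty
  counter.items.foldl
    (fun ans item => if item.2 ≥ item.1 ∧ item.1 > ans then item.1 else ans) (-1)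

-- ===== PORT B =====
-- outer while loop of Source B: one step handles the run of the current head value
-- (the inner 'while s[j] == v' is the takeWhile/dropWhile of the run), then
-- continues on the rest of the sorted list.
def searchAltGo : List Int → Int → Int
  | [], ans => ans
  | v :: rest, ans =>
    let run : Int := 1 + (rest.takeWhile (fun x => x == v)).length
    searchAltGo (rest.dropWhile (fun x => x == v))
      (if run ≥ v ∧ v > ans then v else ans)
termination_by s _ => s.length
decreasing_by
  exact Nat.lt_succ_of_le (List.length_dropWhile_le _ _)

def search_alt (lst : List Int) : Int :=
  searchAltGo (PySem.List.sorted lst (fun x => x) false) (-1)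

-- ===== PRECONDITION & SPEC =====
def Spec_search (lst : List Int) (out : Int) : Prop := out = search_alt lst
instance (lst : List Int) (out : Int) : Decidable (Spec_search lst out) := by unfold Spec_search; infer_instance

-- ===== CLAIM (what is proved, stated in full; the proofs are below) =====
def Claim_equal_search : Prop := ∀ (lst : List Int), Dom_search lst → Spec_search lst (search lst)

-- ===== LEMMAS AND PROOFS =====

-- the max-update step of both programs, parameterised by the multiset the count refers to
def stepc (l : List Int) (ans k : Int) : Int :=
  if (l.count k : Int) ≥ k ∧ k > ans then k else ans

theorem stepc_comm (l : List Int) (a x y : Int) :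
    stepc l (stepc l a x) y = stepc l (stepc l a y) x := by
  unfold stepc
  split_ifs <;> omega

-- A's result is the fold of the max-update step over the distinct values
theorem search_eq_foldl (lst : List Int) :
    search lst = List.foldl (stepc lst) (-1) (PySem.List.dedup lst) := by
  unfold search
  show List.foldl _ (-1) (PySem.Dict.counter lst).items = _
  rw [PySem.Dict.items_counter, List.foldl_map, PySem.List.dedup_eq_ofList]
  rfl

theorem not_mem_dropWhile_beq (v : Int) (rest : List Int)
    (hp : List.Pairwise (· ≤ ·) (v :: rest)) :
    v ∉ rest.dropWhile (fun x => x == v) := by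
  intro hv
  set d := rest.dropWhile (fun x => x == v) with hd
  have hdne : d ≠ [] := by intro h; rw [h] at hv; exact (List.not_mem_nil) hv
  have hhead : ((d.head hdne) == v) = false := List.head_dropWhile_not _ hdne
  have hhne : d.head hdne ≠ v := by
    intro h; rw [h] at hhead; simp at hhead
  have hrest : ∀ x ∈ rest, v ≤ x := (List.pairwise_cons.mp hp).1
  have hdsub : d.Sublist rest := List.dropWhile_sublist _
  have hdp : List.Pairwise (· ≤ ·) d :=
    (List.pairwise_cons.mp hp).2.sublist hdsub
  have hvh : v ≤ d.head hdne := hrest _ (hdsub.mem (List.head_mem hdne))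
  -- d = head :: tail, head ≤ every element of tail; v ∈ d
  rcases List.exists_cons_of_ne_nil hdne with ⟨h, t, hct⟩
  have hheq : d.head hdne = h := by simp [hct]
  rw [hheq] at hhne hvh
  have hht : ∀ x ∈ t, h ≤ x := by
    have := hdp; rw [hct] at this
    exact (List.pairwise_cons.mp this).1
  rw [hct] at hv
  rcases List.mem_cons.mp hv with h1 | h2
  · exact hhne h1.symm
  · exact hhne (le_antisymm (hht _ h2) hvh)

-- B's scan over a sorted list is the same fold over its distinct values
theorem searchAltGo_eq_foldl : ∀ (n : Nat) (s : List Int), s.length ≤ n →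
    List.Pairwise (· ≤ ·) s → ∀ a,
    searchAltGo s a = List.foldl (stepc s) a (PySem.List.dedup s) := by
  intro n
  induction n with
  | zero =>
    intro s hlen _ a
    have : s = [] := List.eq_nil_of_length_eq_zero (Nat.le_zero.mp hlen)
    subst this
    simp [searchAltGo, PySem.List.dedup, PySem.Set.ofList]
  | succ m ih =>
    intro s hlen hp a
    cases s with
    | nil => simp [searchAltGo, PySem.List.dedup, PySem.Set.ofList]
    | cons v rest =>
      set t := rest.takeWhile (fun x => x == v) with htdef
      set d := rest.dropWhile (fun x => x == v) with hddef
      have hsplit : t ++ d = rest := List.takeWhile_append_dropWhile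
      have ht : ∀ x ∈ t, x = v := by
        intro x hx
        have := List.mem_takeWhile_imp hx
        simpa using this
      have hvd : v ∉ d := not_mem_dropWhile_beq v rest hp
      -- counts
      have hcv : (v :: rest).count v = 1 + t.length := by
        rw [← hsplit, ← List.cons_append, List.count_append,
          List.count_cons_self, List.count_eq_zero.mpr hvd,
          List.count_eq_length.mpr (fun b hb => (ht b hb).symm)]
        omega
      have hcx : ∀ x ∈ d, (v :: rest).count x = d.count x := by
        intro x hx
        have hxv : x ≠ v := fun h => hvd (h ▸ hx)
        have hxt : x ∉ t := fun h => hxv (ht x h)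
        rw [← hsplit, ← List.cons_append, List.count_append]
        have : (v :: t).count x = 0 := by
          apply List.count_eq_zero.mpr
          intro h
          rcases List.mem_cons.mp h with h1 | h2
          · exact hxv h1
          · exact hxt h2
        omega
      -- the step value for v
      have ha' : (if (1 + (t.length : Int)) ≥ v ∧ v > a then v else a)
          = stepc (v :: rest) a v := by
        unfold stepc
        rw [hcv]; push_cast; ring_nf
      -- dedup (v :: rest) is a permutation of v :: dedup d
      have hnd1 : (PySem.List.dedup (v :: rest)).Nodup := PySem.List.nodup_dedup _
      have hnd2 : (v :: PySem.List.dedup d).Nodup := by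
        apply List.nodup_cons.mpr
        exact ⟨fun h => hvd ((PySem.List.mem_dedup d v).mp h), PySem.List.nodup_dedup _⟩
      have hperm : (PySem.List.dedup (v :: rest)).Perm (v :: PySem.List.dedup d) := by
        rw [List.perm_ext_iff_of_nodup hnd1 hnd2]
        intro x
        rw [PySem.List.mem_dedup, List.mem_cons, List.mem_cons, PySem.List.mem_dedup,
          ← hsplit, List.mem_append]
        constructor
        · rintro (h1 | h2 | h3)
          · exact Or.inl h1
          · exact Or.inl (ht x h2)
          · exact Or.inr h3
        · rintro (h1 | h2)
          · exact Or.inl h1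
          · exact Or.inr (Or.inr h2)
      have hd_pair : List.Pairwise (· ≤ ·) d :=
        (List.pairwise_cons.mp hp).2.sublist (List.dropWhile_sublist _)
      have hd_len : d.length ≤ m := by
        have h1 : d.length ≤ rest.length := List.length_dropWhile_le _ _
        have h2 : rest.length ≤ m := by
          have := hlen; simp at this; omega
        omega
      calc searchAltGo (v :: rest) a
          = searchAltGo d (stepc (v :: rest) a v) := by
            rw [searchAltGo, ← ha']
        _ = List.foldl (stepc d) (stepc (v :: rest) a v) (PySem.List.dedup d) :=
            ih d hd_len hd_pair _
        _ = List.foldl (stepc (v :: rest)) (stepc (v :: rest) a v) (PySem.List.dedup d) := by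
            apply (PySem.List.foldl_congr_mem _ _ _ _ _).symm
            intro acc x hx
            unfold stepc
            rw [hcx x ((PySem.List.mem_dedup d x).mp hx)]
        _ = List.foldl (stepc (v :: rest)) a (v :: PySem.List.dedup d) := rfl
        _ = List.foldl (stepc (v :: rest)) a (PySem.List.dedup (v :: rest)) := by
            exact (hperm.symm.foldl_eq' (fun x _ y _ z => stepc_comm _ z x y) a)

theorem foldl_stepc_perm (l l' : List Int) (hc : ∀ x, l.count x = l'.count x)
    (hp : (PySem.List.dedup l).Perm (PySem.List.dedup l')) (a : Int) :
    List.foldl (stepc l) a (PySem.List.dedup l)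
      = List.foldl (stepc l') a (PySem.List.dedup l') := by
  have hstep : ∀ acc x, x ∈ PySem.List.dedup l → stepc l acc x = stepc l' acc x := by
    intro acc x _
    unfold stepc
    rw [hc x]
  rw [PySem.List.foldl_congr_mem _ _ _ _ hstep]
  exact hp.foldl_eq' (fun x _ y _ z => stepc_comm _ z x y) a

-- ===== VERDICT (by name: the statement is the Claim_ definition above) =====
theorem search_spec : Claim_equal_search := by
  intro lst _
  unfold Spec_search search_alt
  set s := PySem.List.sorted lst (fun x => x) false with hs
  have hperm : s.Perm lst := PySem.List.sorted_perm lst (fun x => x) false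
  have hpair : List.Pairwise (· ≤ ·) s := by
    have := PySem.List.sorted_pairwise lst (fun x => x)
    simpa using this
  rw [search_eq_foldl,
    foldl_stepc_perm lst s (fun x => (hperm.count_eq x).symm)
      (by
        rw [List.perm_ext_iff_of_nodup (PySem.List.nodup_dedup _) (PySem.List.nodup_dedup _)]
        intro x
        rw [PySem.List.mem_dedup, PySem.List.mem_dedup]
        exact (hperm.mem_iff).symm),
    ← searchAltGo_eq_foldl s.length s (le_refl _) hpair (-1)]
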